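-- pv_equiv track=rewrite | github.com/jihyuunn/LineCodingTest | _Line1.py | solution
-- ===== SOURCE A (Python) =====
-- def solution(inputString):
--     openString = '({[<'
--     closeString = ')}]>'
--     opencnt = 0
--     pair = 0
--     for i in inputString:
--         if i in openString:
--             opencnt += 1
--         elif i in closeString:
--             opencnt -= 1
--             pair += 1
--             if opencnt < 0:
--                 return -1
--     return pair
-- ===== SOURCE B (Python) =====
-- def solution(inputString):
--     openString = '({[<'
--     closeString = ')}]>'
--     opens = [i for i, c in enumerate(inputString) if c in openString]
--     closes = [i for i, c in enumerate(inputString) if c in closeString]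
--     if len(closes) > len(opens) or any(o > c for o, c in zip(opens, closes)):
--         return -1
--     return len(closes)
-- ===== Notes on version B (the rewrite author's own statement) =====
-- stated objective: alternative
-- what changed: Builds the index lists of opening and closing brackets and decides validity positionally (invalid iff closes outnumber opens or some k-th open comes after the k-th close), instead of tracking a running balance through the string.
import Mathlib
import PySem

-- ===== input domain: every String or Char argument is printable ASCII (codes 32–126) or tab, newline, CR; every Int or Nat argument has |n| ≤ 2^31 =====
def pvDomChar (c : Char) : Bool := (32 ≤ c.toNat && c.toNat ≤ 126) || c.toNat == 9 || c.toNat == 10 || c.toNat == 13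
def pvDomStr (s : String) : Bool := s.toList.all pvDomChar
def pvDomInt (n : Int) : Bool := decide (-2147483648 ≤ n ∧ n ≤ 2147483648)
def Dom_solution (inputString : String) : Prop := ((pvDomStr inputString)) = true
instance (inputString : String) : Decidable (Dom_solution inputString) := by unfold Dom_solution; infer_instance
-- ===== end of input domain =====

-- B decides validity positionally (the k-th open bracket must precede the k-th close bracket)
-- from the two index lists instead of tracking a running balance (objective: alternative).

-- ===== PORT A =====
-- literal transliteration of A's loop: state (opencnt, pair), early return -1 when opencnt drops below 0
def solutionAux : List Char → Int → Int → Int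
  | [], _, pair => pair
  | c :: cs, opencnt, pair =>
    if ("({[<".toList).contains c then
      solutionAux cs (opencnt + 1) pair
    else if (")}]>".toList).contains c then
      if opencnt - 1 < 0 then -1 else solutionAux cs (opencnt - 1) (pair + 1)
    else
      solutionAux cs opencnt pair

def solution (inputString : String) : Int :=
  solutionAux inputString.toList 0 0

-- ===== PORT B =====
-- opens = [i for i, c in enumerate(s) if c in openString]; closes likewise
def solution_alt (inputString : String) : Int :=
  let opens := ((PySem.List.enumerate inputString.toList).filter
      (fun p => ("({[<".toList).contains p.2)).map (·.1)
  let closes := ((PySem.List.enumerate inputString.toList).filter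
      (fun p => (")}]>".toList).contains p.2)).map (·.1)
  if decide (closes.length > opens.length)
      || (opens.zip closes).any (fun p => decide (p.2 < p.1)) then -1
  else (closes.length : Int)

-- ===== PRECONDITION & SPEC =====
def Spec_solution (inputString : String) (out : Int) : Prop := out = solution_alt inputString
instance (inputString : String) (out : Int) : Decidable (Spec_solution inputString out) := by unfold Spec_solution; infer_instance

-- ===== CLAIM (what is proved, stated in full; the proofs are below) =====
def Claim_equal_solution : Prop := ∀ (inputString : String), Dom_solution inputString → Spec_solution inputString (solution inputString)

-- ===== LEMMAS AND PROOFS =====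

-- indices (starting at i) of the open / close brackets, as recursive functions
def pvOps (i : Int) : List Char → List Int
  | [] => []
  | c :: cs => if ("({[<".toList).contains c then i :: pvOps (i + 1) cs else pvOps (i + 1) cs

def pvCls (i : Int) : List Char → List Int
  | [] => []
  | c :: cs => if (")}]>".toList).contains c then i :: pvCls (i + 1) cs else pvCls (i + 1) cs

-- the positional badness test with a credit of o virtual opens preceding everything
def pvBad (os ks : List Int) (o : Nat) : Bool :=
  decide (ks.length > o + os.length)
    || (os.zip (ks.drop o)).any (fun p => decide (p.2 < p.1))

theorem pv_open_not_close (c : Char) (h : ("({[<".toList).contains c = true) :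
    (")}]>".toList).contains c = false := by
  have h' : c = '(' ∨ c = '{' ∨ c = '[' ∨ c = '<' := by simpa using h
  obtain rfl | rfl | rfl | rfl := h' <;> decide

theorem pvOps_ge (cs : List Char) : ∀ (i : Int), ∀ x ∈ pvOps i cs, i ≤ x := by
  induction cs with
  | nil => intro i x hx; simp [pvOps] at hx
  | cons c cs ih =>
    intro i x hx
    by_cases h : ("({[<".toList).contains c = true
    · simp only [pvOps, h, if_true, List.mem_cons] at hx
      rcases hx with rfl | hx
      · exact le_refl x
      · have := ih (i + 1) x hx; omega
    · simp only [pvOps, eq_false_of_ne_true h, Bool.false_eq_true, if_false] at hx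
      have := ih (i + 1) x hx; omega

theorem pvCls_ge (cs : List Char) : ∀ (i : Int), ∀ x ∈ pvCls i cs, i ≤ x := by
  induction cs with
  | nil => intro i x hx; simp [pvCls] at hx
  | cons c cs ih =>
    intro i x hx
    by_cases h : (")}]>".toList).contains c = true
    · simp only [pvCls, h, if_true, List.mem_cons] at hx
      rcases hx with rfl | hx
      · exact le_refl x
      · have := ih (i + 1) x hx; omega
    · simp only [pvCls, eq_false_of_ne_true h, Bool.false_eq_true, if_false] at hx
      have := ih (i + 1) x hx; omega

-- virtual-open credit shift: prepending an open at position i (below every close) is one more credit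
theorem pvBad_open_cons (i : Int) (os ks : List Int) (o : Nat)
    (hks : ∀ x ∈ ks, i + 1 ≤ x) :
    pvBad (i :: os) ks o = pvBad os ks (o + 1) := by
  unfold pvBad
  have hlen : decide (ks.length > o + (i :: os).length)
      = decide (ks.length > (o + 1) + os.length) := by
    apply decide_eq_decide.mpr; simp; omega
  rw [hlen]
  congr 1
  rcases hdrop : ks.drop o with _ | ⟨k, rest⟩
  · have : ks.drop (o + 1) = [] := by
      have : ks.drop (o + 1) = (ks.drop o).tail := by
        rw [← List.drop_drop]; exact List.drop_one
      simp [this, hdrop]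
    simp [this]
  · have hrest : ks.drop (o + 1) = rest := by
      have : ks.drop (o + 1) = (ks.drop o).tail := by
        rw [← List.drop_drop]; exact List.drop_one
      simp [this, hdrop]
    have hk : k ∈ ks := by
      have : k ∈ ks.drop o := by rw [hdrop]; exact List.mem_cons_self
      exact List.mem_of_mem_drop this
    have : decide (k < i) = false := by
      have := hks k hk
      simp only [decide_eq_false_iff_not, not_lt]; omega
    simp [hrest, List.zip_cons_cons, this]

-- main invariant: A's loop with o pending opens equals the positional test with credit o
theorem solutionAux_eq_pvBad (cs : List Char) :
    ∀ (i : Int) (o : Nat) (p : Int),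
      solutionAux cs (o : Int) p =
        (if pvBad (pvOps i cs) (pvCls i cs) o then -1
         else p + ((pvCls i cs).length : Int)) := by
  induction cs with
  | nil => intro i o p; simp [solutionAux, pvOps, pvCls, pvBad]
  | cons c cs ih =>
    intro i o p
    by_cases hop : ("({[<".toList).contains c = true
    · -- open bracket
      have hcl := pv_open_not_close c hop
      rw [show solutionAux (c :: cs) (o : Int) p = solutionAux cs ((o : Int) + 1) p by
            simp only [solutionAux, hop, if_pos],
          show ((o : Int) + 1) = ((o + 1 : Nat) : Int) by push_cast; ring,
          ih (i + 1) (o + 1) p]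
      have hops : pvOps i (c :: cs) = i :: pvOps (i + 1) cs := by
        simp only [pvOps, hop, if_true]
      have hcls : pvCls i (c :: cs) = pvCls (i + 1) cs := by
        simp only [pvCls, hcl, Bool.false_eq_true, if_false]
      rw [hops, hcls, pvBad_open_cons i _ _ o (pvCls_ge cs (i + 1))]
    · by_cases hcl : (")}]>".toList).contains c = true
      · -- close bracket
        have hops : pvOps i (c :: cs) = pvOps (i + 1) cs := by
          simp only [pvOps, eq_false_of_ne_true hop, Bool.false_eq_true, if_false]
        have hcls : pvCls i (c :: cs) = i :: pvCls (i + 1) cs := by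
          simp only [pvCls, hcl, if_true]
        rw [show solutionAux (c :: cs) (o : Int) p
              = if (o : Int) - 1 < 0 then -1 else solutionAux cs ((o : Int) - 1) (p + 1) by
            simp only [solutionAux, eq_false_of_ne_true hop, Bool.false_eq_true,
              if_false, hcl, if_true], hops, hcls]
        rcases o with _ | o'
        · -- o = 0 : A returns -1; positional test must fire
          rw [if_pos (by norm_num)]
          have hbad : pvBad (pvOps (i + 1) cs) (i :: pvCls (i + 1) cs) 0 = true := by
            unfold pvBad
            rcases hos : pvOps (i + 1) cs with _ | ⟨a, os'⟩
            · simp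
            · have ha : i + 1 ≤ a := pvOps_ge cs (i + 1) a (by rw [hos]; exact List.mem_cons_self)
              have : decide (i < a) = true := by simp only [decide_eq_true_eq]; omega
              simp [List.zip_cons_cons, this]
          rw [hbad]; simp
        · -- o = o' + 1 : consume one credit
          rw [if_neg (by push_cast; omega),
              show ((o' + 1 : Nat) : Int) - 1 = (o' : Int) by push_cast; ring,
              ih (i + 1) o' (p + 1)]
          have hbad : pvBad (pvOps (i + 1) cs) (i :: pvCls (i + 1) cs) (o' + 1)
              = pvBad (pvOps (i + 1) cs) (pvCls (i + 1) cs) o' := by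
            unfold pvBad
            have hlen : decide ((i :: pvCls (i + 1) cs).length > (o' + 1) + (pvOps (i + 1) cs).length)
                = decide ((pvCls (i + 1) cs).length > o' + (pvOps (i + 1) cs).length) := by
              apply decide_eq_decide.mpr; simp; omega
            rw [hlen, List.drop_succ_cons]
          rw [hbad]
          split_ifs with h
          · rfl
          · simp only [List.length_cons]; push_cast; ring
      · -- other character
        have hops : pvOps i (c :: cs) = pvOps (i + 1) cs := by
          simp only [pvOps, eq_false_of_ne_true hop, Bool.false_eq_true, if_false]
        have hcls : pvCls i (c :: cs) = pvCls (i + 1) cs := by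
          simp only [pvCls, eq_false_of_ne_true hcl, Bool.false_eq_true, if_false]
        rw [show solutionAux (c :: cs) (o : Int) p = solutionAux cs (o : Int) p by
              simp only [solutionAux, eq_false_of_ne_true hop, eq_false_of_ne_true hcl,
                Bool.false_eq_true, if_false],
            hops, hcls, ih (i + 1) o p]

-- B's enumerate/filter/map comprehensions compute pvOps / pvCls
theorem pv_enum_filter_ops (cs : List Char) : ∀ (i : Int),
    ((PySem.List.enumerate cs i).filter (fun p => ("({[<".toList).contains p.2)).map (·.1)
      = pvOps i cs := by
  induction cs with
  | nil => intro i; simp [PySem.List.enumerate_nil, pvOps]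
  | cons c cs ih =>
    intro i
    rw [PySem.List.enumerate_cons, List.filter_cons]
    by_cases h : ("({[<".toList).contains c = true
    · simp only [h, if_true, List.map_cons, ih (i + 1), pvOps]
    · simp only [eq_false_of_ne_true h, Bool.false_eq_true, if_false, ih (i + 1), pvOps]

theorem pv_enum_filter_cls (cs : List Char) : ∀ (i : Int),
    ((PySem.List.enumerate cs i).filter (fun p => (")}]>".toList).contains p.2)).map (·.1)
      = pvCls i cs := by
  induction cs with
  | nil => intro i; simp [PySem.List.enumerate_nil, pvCls]
  | cons c cs ih =>
    intro i
    rw [PySem.List.enumerate_cons, List.filter_cons]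
    by_cases h : (")}]>".toList).contains c = true
    · simp only [h, if_true, List.map_cons, ih (i + 1), pvCls]
    · simp only [eq_false_of_ne_true h, Bool.false_eq_true, if_false, ih (i + 1), pvCls]

-- ===== VERDICT (by name: the statement is the Claim_ definition above) =====
theorem solution_spec : Claim_equal_solution := by
  intro s _
  unfold Spec_solution solution solution_alt
  rw [pv_enum_filter_ops s.toList 0, pv_enum_filter_cls s.toList 0]
  have h := solutionAux_eq_pvBad s.toList 0 0 0
  simp only [Nat.cast_zero] at h
  rw [h]
  unfold pvBad
  simp only [List.drop_zero, zero_add]
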